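-- pv_equiv track=rewrite | github.com/charmingcode/osp_build | lib/cmd_base.py | __getopt_split
-- ===== SOURCE A (Python) =====
-- def __getopt_split(argv):
--   argv1 = []
--   argv2 = []
--
--   flag = False
--   for arg in argv:
--     if flag:
--       argv2.append(arg)
--     else:
--       if arg == "--":
--         flag = True
--       else:
--         argv1.append(arg)
--   return (argv1, argv2)
-- ===== SOURCE B (Python) =====
-- def __getopt_split(argv):
--   if "--" not in argv:
--     return (list(argv), [])
--   i = argv.index("--")
--   return (list(argv[:i]), list(argv[i+1:]))
-- ===== Notes on version B (the rewrite author's own statement) =====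
-- stated objective: simpler
-- what changed: B locates the first '--' with index() and returns two slices, instead of A's stateful element-by-element pass with a toggled flag.
import Mathlib
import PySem

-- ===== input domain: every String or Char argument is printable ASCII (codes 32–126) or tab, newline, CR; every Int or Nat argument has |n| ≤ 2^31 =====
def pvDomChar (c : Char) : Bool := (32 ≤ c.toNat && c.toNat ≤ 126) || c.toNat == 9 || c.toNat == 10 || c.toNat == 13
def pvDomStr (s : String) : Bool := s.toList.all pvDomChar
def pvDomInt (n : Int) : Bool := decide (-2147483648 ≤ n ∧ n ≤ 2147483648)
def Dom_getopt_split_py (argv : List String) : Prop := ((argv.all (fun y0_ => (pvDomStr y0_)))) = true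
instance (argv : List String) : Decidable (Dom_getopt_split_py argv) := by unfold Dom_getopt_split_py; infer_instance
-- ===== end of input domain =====

-- B replaces A's stateful flag-toggling pass by index() + two slices (objective: simpler).

-- ===== PORT A =====
-- the for-loop over argv carrying (argv1, argv2, flag)
def getoptLoopA : List String → List String → List String → Bool → List String × List String
  | [], a1, a2, _ => (a1, a2)
  | arg :: rest, a1, a2, flag =>
    if flag then getoptLoopA rest a1 (a2 ++ [arg]) flag
    else if arg == "--" then getoptLoopA rest a1 a2 true
    else getoptLoopA rest (a1 ++ [arg]) a2 flag

def getopt_split_py (argv : List String) : List String × List String :=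
  getoptLoopA argv [] [] false

-- ===== PORT B =====
def getopt_split_py_alt (argv : List String) : List String × List String :=
  match PySem.List.index? argv "--" with   -- '"--" not in argv' ↔ index? = none
  | none => (argv, [])
  | some i => (PySem.List.slice argv none (some (i : Int)),
               PySem.List.slice argv (some ((i : Int) + 1)) none)

-- ===== PRECONDITION & SPEC =====
def Spec_getopt_split_py (argv : List String) (out : List String × List String) : Prop := out = getopt_split_py_alt argv
instance (argv : List String) (out : List String × List String) : Decidable (Spec_getopt_split_py argv out) := by unfold Spec_getopt_split_py; infer_instance

-- ===== CLAIM (what is proved, stated in full; the proofs are below) =====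
def Claim_equal_getopt_split_py : Prop := ∀ (argv : List String), Dom_getopt_split_py argv → Spec_getopt_split_py argv (getopt_split_py argv)

-- ===== LEMMAS AND PROOFS =====
theorem getoptLoopA_true (l a1 a2 : List String) :
    getoptLoopA l a1 a2 true = (a1, a2 ++ l) := by
  induction l generalizing a2 with
  | nil => simp [getoptLoopA]
  | cons x xs ih => simp [getoptLoopA, ih]

theorem getoptLoopA_false (l a1 : List String) :
    getoptLoopA l a1 [] false =
      match PySem.List.index? l "--" with
      | none => (a1 ++ l, [])
      | some i => (a1 ++ l.take i, l.drop (i + 1)) := by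
  induction l generalizing a1 with
  | nil => simp [getoptLoopA, PySem.List.index?]
  | cons x xs ih =>
    by_cases hx : x = "--"
    · subst hx
      rw [PySem.List.index?_cons_self]
      simp [getoptLoopA, getoptLoopA_true]
    · rw [PySem.List.index?_cons_of_ne xs hx]
      simp only [getoptLoopA, if_neg (by simp [hx] : ¬ (x == "--") = true), if_neg Bool.false_ne_true]
      rw [ih (a1 ++ [x])]
      cases PySem.List.index? xs "--" with
      | none => simp
      | some i => simp [List.take_succ_cons]

theorem getopt_split_py_spec : Claim_equal_getopt_split_py := by
  intro argv _
  unfold Spec_getopt_split_py getopt_split_py getopt_split_py_alt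
  rw [getoptLoopA_false]
  cases h : PySem.List.index? argv "--" with
  | none => simp
  | some i =>
    simp only [List.nil_append]
    rw [PySem.List.slice_to_natCast]
    have : ((i : Int) + 1) = ((i + 1 : Nat) : Int) := by push_cast; ring
    rw [this, PySem.List.slice_from_natCast]
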